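-- pv_equiv track=rewrite | github.com/nxndan/votingSim | election/system.py | ranked_pairs_winner
-- ===== SOURCE A (Python) =====
-- def ranked_pairs_winner(ballots):
--     """
--     Implements the Ranked Pairs (Tideman) voting method.
--     It constructs pairwise victories and locks them to avoid cycles.
--     """
--     if not ballots:
--         return None
--     candidates = list(ballots[0])
--
--     # Pairwise preferences
--     pairwise = { (a,b): 0 for a in candidates for b in candidates if a != b }
--     for ballot in ballots:
--         for i_idx, i in enumerate(ballot):
--             for j in ballot[i_idx+1:]:
--                 pairwise[(i,j)] += 1
--
--     # Sort pairs by strength of victory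
--     pairs = []
--     for a in candidates:
--         for b in candidates:
--             if a == b:
--                 continue
--             a_over_b = pairwise.get((a,b), 0)
--             b_over_a = pairwise.get((b,a), 0)
--             if a_over_b > b_over_a:
--                 margin = a_over_b - b_over_a
--                 pairs.append((a, b, margin))
--     pairs.sort(key=lambda x: -x[2])  # strongest victories first
--
--     # Lock pairs avoiding cycles
--     locked = {c: set() for c in candidates}
--
--     def creates_cycle(start, end, graph):
--         """Detect if adding a link start->end would create a cycle."""
--         stack = [end]
--         visited = set()
--         while stack:
--             node = stack.pop()
--             if node == start:
--                 return True
--             visited.add(node)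
--             for nxt in graph[node]:
--                 if nxt not in visited:
--                     stack.append(nxt)
--         return False
--
--     for winner, loser, margin in pairs:
--         if not creates_cycle(winner, loser, locked):
--             locked[winner].add(loser)
--
--     # Candidate with no incoming edges is the winner
--     incoming = {c: 0 for c in candidates}
--     for a in locked:
--         for b in locked[a]:
--             incoming[b] += 1
--
--     zero_in = [c for c,v in incoming.items() if v == 0]
--     return zero_in[0] if zero_in else None
-- ===== SOURCE B (Python) =====
-- def ranked_pairs_winner(ballots):
--     """Ranked Pairs (Tideman) winner; cycle checks via a maintained reachability
--     matrix instead of a DFS per considered edge."""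
--     if not ballots:
--         return None
--     candidates = list(ballots[0])
--
--     pairwise = {(a, b): 0 for a in candidates for b in candidates if a != b}
--     for ballot in ballots:
--         for i_idx, i in enumerate(ballot):
--             for j in ballot[i_idx + 1:]:
--                 pairwise[(i, j)] += 1
--
--     pairs = []
--     for a in candidates:
--         for b in candidates:
--             if a == b:
--                 continue
--             a_over_b = pairwise.get((a, b), 0)
--             b_over_a = pairwise.get((b, a), 0)
--             if a_over_b > b_over_a:
--                 pairs.append((a, b, a_over_b - b_over_a))
--     pairs.sort(key=lambda x: -x[2])
--
--     # reach[c] = set of nodes reachable from c in the locked graph (incl. c)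
--     reach = {c: {c} for c in candidates}
--     locked_edges = []
--     for winner, loser, margin in pairs:
--         if winner not in reach[loser]:  # locking cannot create a cycle
--             locked_edges.append((winner, loser))
--             gained = set(reach[loser])
--             for x in candidates:
--                 if winner in reach[x]:
--                     reach[x] |= gained
--     has_incoming = {b for (a, b) in locked_edges}
--     for c in candidates:
--         if c not in has_incoming:
--             return c
--     return None
-- ===== Notes on version B (the rewrite author's own statement) =====
-- stated objective: faster
-- what changed: The per-candidate-pair DFS cycle check is replaced by an incrementally maintained reachability matrix (reach[c] = nodes reachable from c in the locked graph), so locking an edge is one membership test plus a set-union sweep, and the winner is found by scanning for the first candidate that is no locked edge's loser instead of building an incoming-count dict.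
import Mathlib
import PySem

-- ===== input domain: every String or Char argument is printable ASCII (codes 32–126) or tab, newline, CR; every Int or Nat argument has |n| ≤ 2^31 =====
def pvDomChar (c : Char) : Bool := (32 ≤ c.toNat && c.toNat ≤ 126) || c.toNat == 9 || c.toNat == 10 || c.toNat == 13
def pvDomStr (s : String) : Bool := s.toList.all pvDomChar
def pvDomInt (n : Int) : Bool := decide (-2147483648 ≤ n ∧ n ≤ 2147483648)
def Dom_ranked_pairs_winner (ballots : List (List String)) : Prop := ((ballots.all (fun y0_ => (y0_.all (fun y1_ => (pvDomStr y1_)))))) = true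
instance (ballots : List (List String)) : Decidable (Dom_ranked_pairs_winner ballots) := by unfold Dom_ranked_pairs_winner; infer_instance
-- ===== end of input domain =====

-- B replaces A's per-pair DFS cycle test by a maintained reachability matrix and finds the
-- winner by scanning for the first candidate that is no locked edge's loser.

-- ===== PORT A =====

-- { (a,b): 0 for a in candidates for b in candidates if a != b }
def pvA_initPairwise (candidates : List String) : PySem.Dict (String × String) Int :=
  candidates.foldl (fun d a =>
    candidates.foldl (fun d b => if a ≠ b then d.insert (a, b) 0 else d) d) PySem.Dict.empty

-- the pairwise tally loops (pairwise[(i,j)] += 1; KeyError excluded by Pre_)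
def pvA_tally (ballots : List (List String)) (d : PySem.Dict (String × String) Int) :
    PySem.Dict (String × String) Int :=
  ballots.foldl (fun d ballot =>
    (PySem.List.enumerate ballot).foldl (fun d p =>
      (PySem.List.slice ballot (some (p.1 + 1)) none).foldl (fun d j =>
        d.modify (p.2, j) 0 (· + 1)) d) d) d

-- the pairs-building loops
def pvA_pairs (candidates : List String) (pw : PySem.Dict (String × String) Int) :
    List (String × String × Int) :=
  candidates.foldl (fun ps a =>
    candidates.foldl (fun ps b =>
      if a = b then ps
      else
        if pw.getD (a, b) 0 > pw.getD (b, a) 0 then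
          ps ++ [(a, b, pw.getD (a, b) 0 - pw.getD (b, a) 0)]
        else ps) ps) []

-- termination measures for the DFS (creates_cycle): lexicographic
-- (#unvisited possible nodes, #visited entries on the stack)
def pvA_ccM1 (g : PySem.Dict String (PySem.Set String)) (stack visited : List String) : Nat :=
  ((g.values.flatten ++ stack).toFinset.filter (fun x => x ∉ visited)).card

def pvA_ccM2 (stack visited : List String) : Nat :=
  (stack.filter (fun x => PySem.Set.contains visited x)).length

lemma pvA_getD_sub (g : PySem.Dict String (PySem.Set String)) (node : String) :
    ∀ x ∈ g.getD node [], x ∈ g.values.flatten := by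
  intro x hx
  rcases h : g.get? node with _ | s
  · rw [PySem.Dict.getD_of_get?_eq_none g ([] : PySem.Set String) h] at hx; cases hx
  · rw [PySem.Dict.getD_of_get?_eq_some g ([] : PySem.Set String) h] at hx
    have := PySem.Dict.mem_items_of_get?_eq_some _ h
    exact List.mem_flatten.2 ⟨s, List.mem_map.2 ⟨(node, s), this, rfl⟩, hx⟩

lemma pvA_ccM1_le (g : PySem.Dict String (PySem.Set String))
    (stack' stack vis' vis : List String)
    (hs : ∀ x ∈ stack', x ∈ g.values.flatten ∨ x ∈ stack)
    (hv : ∀ x ∈ vis, x ∈ vis') :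
    pvA_ccM1 g stack' vis' ≤ pvA_ccM1 g stack vis := by
  apply Finset.card_le_card
  intro x hx
  rw [Finset.mem_filter, List.mem_toFinset, List.mem_append] at hx ⊢
  refine ⟨?_, fun h => hx.2 (hv x h)⟩
  rcases hx.1 with h | h
  · exact Or.inl h
  · exact hs x h

lemma pvA_ccM1_lt (g : PySem.Dict String (PySem.Set String))
    (stack' stack vis' vis : List String) (node : String)
    (hs : ∀ x ∈ stack', x ∈ g.values.flatten ∨ x ∈ stack)
    (hv : ∀ x ∈ vis, x ∈ vis')
    (h1 : node ∈ stack) (h2 : node ∉ vis) (h3 : node ∈ vis') :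
    pvA_ccM1 g stack' vis' < pvA_ccM1 g stack vis := by
  apply Finset.card_lt_card
  constructor
  · intro x hx
    rw [Finset.mem_filter, List.mem_toFinset, List.mem_append] at hx ⊢
    refine ⟨?_, fun h => hx.2 (hv x h)⟩
    rcases hx.1 with h | h
    · exact Or.inl h
    · exact hs x h
  · intro hsub
    have hmem : node ∈ (g.values.flatten ++ stack).toFinset.filter (fun x => x ∉ vis) := by
      rw [Finset.mem_filter, List.mem_toFinset, List.mem_append]
      exact ⟨Or.inr h1, h2⟩
    have := hsub hmem
    rw [Finset.mem_filter] at this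
    exact this.2 h3

-- port of creates_cycle: stack head = Python's stack top
def pvA_cc (start : String) (g : PySem.Dict String (PySem.Set String))
    (stack : List String) (visited : PySem.Set String) : Bool :=
  match stack with
  | [] => false
  | node :: rest =>
    if node = start then true
    else
      pvA_cc start g
        (((g.getD node []).filter
            (fun n => !(PySem.Set.contains (PySem.Set.add visited node) n))).reverse ++ rest)
        (PySem.Set.add visited node)
termination_by (pvA_ccM1 g stack visited, pvA_ccM2 stack visited)
decreasing_by
  have hs : ∀ x ∈ (List.filter (fun n => !(PySem.Set.contains (PySem.Set.add visited node) n))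
      (g.getD node [])).reverse ++ rest, x ∈ g.values.flatten ∨ x ∈ node :: rest := by
    intro x hx
    rcases List.mem_append.1 hx with h | h
    · exact Or.inl (pvA_getD_sub g node x (List.mem_of_mem_filter (List.mem_reverse.1 h)))
    · exact Or.inr (List.mem_cons_of_mem _ h)
  by_cases hv : node ∈ visited
  · rw [PySem.Set.add_of_mem hv] at *
    have hle : pvA_ccM1 g ((List.filter (fun n => !(PySem.Set.contains visited n))
        (g.getD node [])).reverse ++ rest) visited ≤ pvA_ccM1 g (node :: rest) visited :=
      pvA_ccM1_le g _ _ _ _ hs (fun x h => h)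
    rcases lt_or_eq_of_le hle with hlt | heq
    · exact Prod.Lex.left _ _ hlt
    · rw [heq]
      apply Prod.Lex.right
      have h1 : List.filter (fun x => PySem.Set.contains visited x)
          (List.filter (fun n => !(PySem.Set.contains visited n)) (g.getD node [])).reverse = [] := by
        rw [List.filter_eq_nil_iff]
        intro a ha hmem
        have h := List.of_mem_filter (List.mem_reverse.1 ha)
        simp at h
        exact h ((PySem.Set.contains_iff visited a).1 hmem)
      have hm2 : pvA_ccM2 ((List.filter (fun n => !(PySem.Set.contains visited n))
          (g.getD node [])).reverse ++ rest) visited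
          = (List.filter (fun x => PySem.Set.contains visited x) rest).length := by
        unfold pvA_ccM2; rw [List.filter_append, h1, List.nil_append]
      have hm3 : pvA_ccM2 (node :: rest) visited
          = (List.filter (fun x => PySem.Set.contains visited x) rest).length + 1 := by
        unfold pvA_ccM2
        rw [List.filter_cons]
        simp [hv]
      rw [hm2, hm3]
      omega
  · apply Prod.Lex.left
    apply pvA_ccM1_lt g _ _ _ _ node hs
    · intro x h
      exact (PySem.Set.mem_add _ _ _).2 (Or.inl h)
    · exact List.mem_cons_self
    · exact hv
    · exact (PySem.Set.mem_add _ _ _).2 (Or.inr rfl)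

-- the locking loop
def pvA_lock (pairs : List (String × String × Int))
    (locked : PySem.Dict String (PySem.Set String)) : PySem.Dict String (PySem.Set String) :=
  pairs.foldl (fun locked t =>
    if pvA_cc t.1 locked [t.2.1] PySem.Set.empty then locked
    else locked.modify t.1 [] (fun s => PySem.Set.add s t.2.1)) locked

def ranked_pairs_winner (ballots : List (List String)) : Option String :=
  match ballots with
  | [] => none
  | first :: _ =>
    let candidates := first
    let pairwise := pvA_tally ballots (pvA_initPairwise candidates)
    let pairs := PySem.List.sorted (pvA_pairs candidates pairwise) (fun t => -t.2.2) false
    let locked := pvA_lock pairs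
      (candidates.foldl (fun d c => d.insert c PySem.Set.empty) PySem.Dict.empty)
    let incoming := locked.items.foldl (fun d p => p.2.foldl (fun d b => d.modify b 0 (· + 1)) d)
      (candidates.foldl (fun d c => d.insert c (0 : Int)) PySem.Dict.empty)
    ((incoming.items.filter (fun p => p.2 == 0)).map Prod.fst).head?

-- ===== PORT B =====

def pvB_initPairwise (candidates : List String) : PySem.Dict (String × String) Int :=
  candidates.foldl (fun d a =>
    candidates.foldl (fun d b => if a ≠ b then d.insert (a, b) 0 else d) d) PySem.Dict.empty

def pvB_tally (ballots : List (List String)) (d : PySem.Dict (String × String) Int) :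
    PySem.Dict (String × String) Int :=
  ballots.foldl (fun d ballot =>
    (PySem.List.enumerate ballot).foldl (fun d p =>
      (PySem.List.slice ballot (some (p.1 + 1)) none).foldl (fun d j =>
        d.modify (p.2, j) 0 (· + 1)) d) d) d

def pvB_pairs (candidates : List String) (pw : PySem.Dict (String × String) Int) :
    List (String × String × Int) :=
  candidates.foldl (fun ps a =>
    candidates.foldl (fun ps b =>
      if a = b then ps
      else
        if pw.getD (a, b) 0 > pw.getD (b, a) 0 then
          ps ++ [(a, b, pw.getD (a, b) 0 - pw.getD (b, a) 0)]
        else ps) ps) []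

-- reach[c] = nodes reachable from c in the locked graph; lock (w,l) iff w ∉ reach[l]
def pvB_lock (candidates : List String) (pairs : List (String × String × Int)) :
    PySem.Dict String (PySem.Set String) × List (String × String) :=
  pairs.foldl (fun st t =>
    if PySem.Set.contains (st.1.getD t.2.1 []) t.1 then st
    else
      (candidates.foldl (fun r x =>
          if PySem.Set.contains (r.getD x []) t.1 then
            r.modify x [] (fun s => PySem.Set.union s (st.1.getD t.2.1 []))
          else r) st.1,
       st.2 ++ [(t.1, t.2.1)]))
    (candidates.foldl (fun d c => d.insert c [c]) PySem.Dict.empty, [])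

def ranked_pairs_winner_alt (ballots : List (List String)) : Option String :=
  match ballots with
  | [] => none
  | first :: _ =>
    let candidates := first
    let pairwise := pvB_tally ballots (pvB_initPairwise candidates)
    let pairs := PySem.List.sorted (pvB_pairs candidates pairwise) (fun t => -t.2.2) false
    let st := pvB_lock candidates pairs
    candidates.find? (fun c => !(PySem.Set.contains (PySem.Set.ofList (st.2.map (fun e => e.2))) c))

-- ===== PRECONDITION & SPEC =====
-- Pre_ excludes exactly the inputs where A raises KeyError: a ballot with at least two entries
-- that has a duplicate entry or an entry not on the first ballot makes pairwise[(i,j)] += 1 hit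
-- a missing key (ballots with fewer than two entries produce no pairs and never raise).
def Pre_ranked_pairs_winner (ballots : List (List String)) : Prop :=
  ∀ b ∈ ballots, 2 ≤ b.length → (b.Nodup ∧ ∀ x ∈ b, x ∈ ballots.headI)
instance (ballots : List (List String)) : Decidable (Pre_ranked_pairs_winner ballots) := by
  unfold Pre_ranked_pairs_winner; infer_instance

def pvWitness_ranked_pairs_winner : List (List String) := [["a", "b"], ["b", "a"]]

def Spec_ranked_pairs_winner (ballots : List (List String)) (out : Option String) : Prop :=
  out = ranked_pairs_winner_alt ballots
instance (ballots : List (List String)) (out : Option String) :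
    Decidable (Spec_ranked_pairs_winner ballots out) := by
  unfold Spec_ranked_pairs_winner; infer_instance

-- ===== CLAIM (what is proved, stated in full; the proofs are below) =====
def Claim_equal_ranked_pairs_winner : Prop := ∀ (ballots : List (List String)), Dom_ranked_pairs_winner ballots → Pre_ranked_pairs_winner ballots → Spec_ranked_pairs_winner ballots (ranked_pairs_winner ballots)

-- ===== LEMMAS AND PROOFS =====

def pvReach (E : List (String × String)) (x y : String) : Prop :=
  Relation.ReflTransGen (fun a b => (a, b) ∈ E) x y

-- the invariant tying A's locked dict to B's (reach, edges) state
def pvInv (candidates : List String) (locked reach : PySem.Dict String (PySem.Set String))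
    (E : List (String × String)) : Prop :=
  locked.keys = candidates ∧
  (∀ x y, y ∈ locked.getD x [] ↔ (x, y) ∈ E) ∧
  (∀ c ∈ candidates, ∀ x, x ∈ reach.getD c [] ↔ pvReach E c x) ∧
  (∀ e ∈ E, e.2 ∈ candidates)

theorem pv_cc_sound (start : String) (g : PySem.Dict String (PySem.Set String)) :
    ∀ stack visited, pvA_cc start g stack visited = true →
      ∃ v ∈ stack, Relation.ReflTransGen (fun a b => b ∈ g.getD a []) v start := by
  intro stack visited
  induction stack, visited using pvA_cc.induct (start := start) (g := g) with
  | case1 visited => intro h; simp [pvA_cc] at h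
  | case2 visited rest => intro _; exact ⟨start, List.mem_cons_self, Relation.ReflTransGen.refl⟩
  | case3 visited node rest hne ih =>
    intro h
    rw [pvA_cc] at h
    rw [if_neg hne] at h
    rcases ih h with ⟨v, hv, hr⟩
    rcases List.mem_append.1 hv with hv | hv
    · have hvn : v ∈ g.getD node [] := List.mem_of_mem_filter (List.mem_reverse.1 hv)
      exact ⟨node, List.mem_cons_self, Relation.ReflTransGen.head hvn hr⟩
    · exact ⟨v, List.mem_cons_of_mem _ hv, hr⟩

theorem pv_cc_complete (start : String) (g : PySem.Dict String (PySem.Set String)) :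
    ∀ stack visited, pvA_cc start g stack visited = false →
      start ∉ visited →
      (∀ u ∈ visited, ∀ n ∈ g.getD u [], n ∈ visited ∨ n ∈ stack) →
      ∃ S : List String, (∀ v ∈ visited, v ∈ S) ∧ (∀ v ∈ stack, v ∈ S) ∧
        (∀ u ∈ S, ∀ n ∈ g.getD u [], n ∈ S) ∧ start ∉ S := by
  intro stack visited
  induction stack, visited using pvA_cc.induct (start := start) (g := g) with
  | case1 visited =>
    intro _ hstart hclo
    refine ⟨visited, fun v hv => hv, by simp, ?_, hstart⟩
    intro u hu n hn
    rcases hclo u hu n hn with h | h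
    · exact h
    · cases h
  | case2 visited rest => intro h; simp [pvA_cc] at h
  | case3 visited node rest hne ih =>
    intro h hstart hclo
    rw [pvA_cc, if_neg hne] at h
    have hstart' : start ∉ PySem.Set.add visited node := by
      rw [PySem.Set.mem_add]
      rintro (h1 | h1)
      · exact hstart h1
      · exact hne h1.symm
    have hclo' : ∀ u ∈ PySem.Set.add visited node, ∀ n ∈ g.getD u [],
        n ∈ PySem.Set.add visited node ∨
        n ∈ (List.filter (fun n => !(PySem.Set.contains (PySem.Set.add visited node) n))
              (g.getD node [])).reverse ++ rest := by
      intro u hu n hn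
      rcases (PySem.Set.mem_add _ _ _).1 hu with hu | hu
      · rcases hclo u hu n hn with h1 | h1
        · exact Or.inl ((PySem.Set.mem_add _ _ _).2 (Or.inl h1))
        · rcases List.mem_cons.1 h1 with h1 | h1
          · exact Or.inl ((PySem.Set.mem_add _ _ _).2 (Or.inr h1))
          · exact Or.inr (List.mem_append_right _ h1)
      · subst hu
        by_cases hnv : n ∈ PySem.Set.add visited u
        · exact Or.inl hnv
        · refine Or.inr (List.mem_append_left _ (List.mem_reverse.2 (List.mem_filter.2 ⟨hn, ?_⟩)))
          simp only [Bool.not_eq_true']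
          rw [← Bool.not_eq_true, PySem.Set.contains_iff]
          exact hnv
    rcases ih h hstart' hclo' with ⟨S, hvS, hsS, hcl, hns⟩
    refine ⟨S, fun v hv => hvS v ((PySem.Set.mem_add _ _ _).2 (Or.inl hv)), ?_, hcl, hns⟩
    intro v hv
    rcases List.mem_cons.1 hv with hv | hv
    · exact hvS v ((PySem.Set.mem_add _ _ _).2 (Or.inr hv))
    · exact hsS v (List.mem_append_right _ hv)

theorem pv_closed_reach (g : PySem.Dict String (PySem.Set String)) (S : List String)
    (hcl : ∀ u ∈ S, ∀ n ∈ g.getD u [], n ∈ S) {a b : String}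
    (h : Relation.ReflTransGen (fun a b => b ∈ g.getD a []) a b) (ha : a ∈ S) : b ∈ S := by
  induction h with
  | refl => exact ha
  | tail _ h2 ih => exact hcl _ ih _ h2

theorem pv_cc_iff (start e : String) (g : PySem.Dict String (PySem.Set String)) :
    pvA_cc start g [e] PySem.Set.empty = true ↔
      Relation.ReflTransGen (fun a b => b ∈ g.getD a []) e start := by
  constructor
  · intro h
    rcases pv_cc_sound start g [e] _ h with ⟨v, hv, hr⟩
    rcases List.mem_singleton.1 hv with rfl
    exact hr
  · intro hr
    by_contra hfalse
    have hf : pvA_cc start g [e] PySem.Set.empty = false := by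
      cases h : pvA_cc start g [e] PySem.Set.empty
      · rfl
      · exact absurd h hfalse
    rcases pv_cc_complete start g [e] PySem.Set.empty hf (by intro h; cases h)
        (by intro u hu; cases hu) with ⟨S, _, hsS, hcl, hns⟩
    have heS : e ∈ S := hsS e (List.mem_singleton.2 rfl)
    exact hns (pv_closed_reach g S hcl hr heS)

theorem pv_reach_append (E : List (String × String)) (w l : String) :
    ∀ x y, pvReach (E ++ [(w, l)]) x y ↔
      pvReach E x y ∨ (pvReach E x w ∧ pvReach E l y) := by
  intro x y
  unfold pvReach
  constructor
  · intro h
    induction h using Relation.ReflTransGen.head_induction_on with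
    | refl => exact Or.inl Relation.ReflTransGen.refl
    | head hab _ ih =>
      rename_i a c _
      rcases List.mem_append.1 hab with hE | hwl
      · rcases ih with h1 | ⟨h2, h3⟩
        · exact Or.inl (Relation.ReflTransGen.head hE h1)
        · exact Or.inr ⟨Relation.ReflTransGen.head hE h2, h3⟩
      · have hac : a = w ∧ c = l := by
          rcases List.mem_singleton.1 hwl with h1
          exact ⟨congrArg Prod.fst h1, congrArg Prod.snd h1⟩
        obtain ⟨rfl, rfl⟩ := hac
        rcases ih with h1 | ⟨_, h3⟩
        · exact Or.inr ⟨Relation.ReflTransGen.refl, h1⟩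
        · exact Or.inr ⟨Relation.ReflTransGen.refl, h3⟩
  · intro h
    have mono : ∀ a b, Relation.ReflTransGen (fun u v => (u, v) ∈ E) a b →
        Relation.ReflTransGen (fun u v => (u, v) ∈ E ++ [(w, l)]) a b :=
      fun a b hab => Relation.ReflTransGen.mono (fun u v huv => List.mem_append_left _ huv) hab
    rcases h with h | ⟨h1, h2⟩
    · exact mono _ _ h
    · exact Relation.ReflTransGen.trans
        ((mono _ _ h1).tail (List.mem_append_right _ (List.mem_singleton.2 rfl))) (mono _ _ h2)

theorem pv_rtg_congr {r s : String → String → Prop} (h : ∀ a b, r a b ↔ s a b) {x y : String} :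
    Relation.ReflTransGen r x y ↔ Relation.ReflTransGen s x y :=
  ⟨Relation.ReflTransGen.mono (fun a b => (h a b).1),
   Relation.ReflTransGen.mono (fun a b => (h a b).2)⟩

-- effect of B's reach-update sweep on memberships
theorem pv_upd_fold (w : String) (gained : PySem.Set String) (hwg : w ∉ gained)
    (r0 : PySem.Dict String (PySem.Set String)) :
    ∀ (cs done : List String) (r : PySem.Dict String (PySem.Set String)),
      (∀ x y, y ∈ r.getD x [] ↔
        (y ∈ r0.getD x [] ∨ (w ∈ r0.getD x [] ∧ y ∈ gained ∧ x ∈ done))) →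
      ∀ x y, y ∈ (cs.foldl (fun r x =>
          if PySem.Set.contains (r.getD x []) w then
            r.modify x [] (fun s => PySem.Set.union s gained)
          else r) r).getD x [] ↔
        (y ∈ r0.getD x [] ∨ (w ∈ r0.getD x [] ∧ y ∈ gained ∧ x ∈ done ++ cs)) := by
  intro cs
  induction cs with
  | nil => intro done r h x y; simpa using h x y
  | cons c cs ih =>
    intro done r h x y
    rw [List.foldl_cons]
    have hstep : ∀ x y, y ∈ (if PySem.Set.contains (r.getD c []) w then
        r.modify c [] (fun s => PySem.Set.union s gained) else r).getD x [] ↔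
        (y ∈ r0.getD x [] ∨ (w ∈ r0.getD x [] ∧ y ∈ gained ∧ x ∈ done ++ [c])) := by
      intro x y
      by_cases hc : PySem.Set.contains (r.getD c []) w = true
      · have hw0 : w ∈ r0.getD c [] := by
          rcases (h c w).1 ((PySem.Set.contains_iff _ _).1 hc) with h1 | ⟨_, h2, _⟩
          · exact h1
          · exact absurd h2 hwg
        rw [if_pos hc]
        by_cases hx : x = c
        · rw [PySem.Dict.getD_modify, if_pos hx, PySem.Set.mem_union, h c y, hx]
          have hcd : c ∈ done ++ [c] := by simp
          tauto
        · rw [PySem.Dict.getD_modify, if_neg hx, h x y]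
          have hxd : x ∈ done ++ [c] ↔ x ∈ done := by simp [hx]
          rw [hxd]
      · have hw0 : w ∉ r0.getD c [] := by
          intro hw0
          exact hc ((PySem.Set.contains_iff _ _).2 ((h c w).2 (Or.inl hw0)))
        rw [if_neg hc, h x y]
        by_cases hx : x = c
        · rw [hx]
          have hcd : c ∈ done ++ [c] := by simp
          tauto
        · have hxd : x ∈ done ++ [c] ↔ x ∈ done := by simp [hx]
          rw [hxd]
    have := ih (done ++ [c]) _ hstep x y
    rw [this]
    simp only [List.append_assoc, List.singleton_append]

theorem pv_lock_fold (candidates : List String) :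
    ∀ (ps : List (String × String × Int)) locked reach E,
      (∀ t ∈ ps, t.1 ∈ candidates ∧ t.2.1 ∈ candidates) →
      pvInv candidates locked reach E →
      pvInv candidates
        (ps.foldl (fun locked t =>
          if pvA_cc t.1 locked [t.2.1] PySem.Set.empty then locked
          else locked.modify t.1 [] (fun s => PySem.Set.add s t.2.1)) locked)
        (ps.foldl (fun st t =>
          if PySem.Set.contains (st.1.getD t.2.1 []) t.1 then st
          else
            (candidates.foldl (fun r x =>
                if PySem.Set.contains (r.getD x []) t.1 then
                  r.modify x [] (fun s => PySem.Set.union s (st.1.getD t.2.1 []))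
                else r) st.1,
             st.2 ++ [(t.1, t.2.1)])) (reach, E)).1
        (ps.foldl (fun st t =>
          if PySem.Set.contains (st.1.getD t.2.1 []) t.1 then st
          else
            (candidates.foldl (fun r x =>
                if PySem.Set.contains (r.getD x []) t.1 then
                  r.modify x [] (fun s => PySem.Set.union s (st.1.getD t.2.1 []))
                else r) st.1,
             st.2 ++ [(t.1, t.2.1)])) (reach, E)).2 := by
  intro ps
  induction ps with
  | nil => intro locked reach E _ hinv; simpa using hinv
  | cons t ps ih =>
    intro locked reach E hps hinv
    obtain ⟨hkeys, hedge, hreach, hE2⟩ := hinv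
    obtain ⟨hw, hl⟩ := hps t List.mem_cons_self
    have hps' := fun t' ht' => hps t' (List.mem_cons_of_mem _ ht')
    simp only [List.foldl_cons]
    have hcond : (pvA_cc t.1 locked [t.2.1] PySem.Set.empty = true) ↔
        (PySem.Set.contains (reach.getD t.2.1 []) t.1 = true) := by
      rw [pv_cc_iff, PySem.Set.contains_iff, hreach t.2.1 hl t.1]
      exact pv_rtg_congr (fun a b => hedge a b)
    by_cases hR : PySem.Set.contains (reach.getD t.2.1 []) t.1 = true
    · rw [if_pos (hcond.2 hR), if_pos hR]
      exact ih locked reach E hps' ⟨hkeys, hedge, hreach, hE2⟩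
    · rw [if_neg (fun hc => hR (hcond.1 hc)), if_neg hR]
      have hwg : t.1 ∉ reach.getD t.2.1 [] := fun hm => hR ((PySem.Set.contains_iff _ _).2 hm)
      have hupd := pv_upd_fold t.1 (reach.getD t.2.1 []) hwg reach candidates [] reach
        (by intro x y; simp)
      apply ih
      · exact hps'
      refine ⟨?_, ?_, ?_, ?_⟩
      · rw [PySem.Dict.keys_modify, PySem.Dict.keys_insert_of_contains]
        · exact hkeys
        · rw [PySem.Dict.contains_iff_mem_keys, hkeys]; exact hw
      · intro x y
        rw [PySem.Dict.getD_modify]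
        by_cases hx : x = t.1
        · subst hx
          rw [if_pos rfl, PySem.Set.mem_add, hedge]
          simp [List.mem_append, Prod.ext_iff]
        · rw [if_neg hx, hedge]
          simp [List.mem_append, Prod.ext_iff, hx]
      · intro c hc x
        rw [hupd c x]
        simp only [List.nil_append]
        rw [pv_reach_append E t.1 t.2.1 c x]
        rw [hreach c hc x, hreach c hc t.1, hreach t.2.1 hl x]
        constructor
        · rintro (h1 | ⟨h1, h2, _⟩)
          · exact Or.inl h1
          · exact Or.inr ⟨h1, h2⟩
        · rintro (h1 | ⟨h1, h2⟩)
          · exact Or.inl h1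
          · exact Or.inr ⟨h1, h2, hc⟩
      · intro e he
        rcases List.mem_append.1 he with h1 | h1
        · exact hE2 e h1
        · rcases List.mem_singleton.1 h1 with rfl
          exact hl

theorem pv_getD_zero (cs : List String) :
    ∀ (d : PySem.Dict String Int) (k : String), d.getD k 0 = 0 →
      (cs.foldl (fun d c => d.insert c 0) d).getD k 0 = 0 := by
  induction cs with
  | nil => intro d k h; simpa using h
  | cons c cs ih =>
    intro d k h
    rw [List.foldl_cons]
    apply ih
    rw [PySem.Dict.getD_insert]
    split_ifs
    · rfl
    · exact h

theorem pv_head_filter_map (cs : List String) (f : String → Int) :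
    (((cs.map (fun k => (k, f k))).filter (fun p => p.2 == 0)).map Prod.fst).head?
      = cs.find? (fun k => f k == 0) := by
  induction cs with
  | nil => rfl
  | cons c cs ih => by_cases h : (f c == 0) = true <;> simp [h, ih]

theorem pv_final_eq (candidates : List String) (locked : PySem.Dict String (PySem.Set String))
    (E : List (String × String)) (hnd : candidates.Nodup)
    (hkeys : locked.keys = candidates)
    (hinv : ∀ x y, y ∈ locked.getD x [] ↔ (x, y) ∈ E)
    (hE2 : ∀ e ∈ E, e.2 ∈ candidates) :
    (((locked.items.foldl (fun d p => p.2.foldl (fun d b => d.modify b 0 (· + 1)) d)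
        (candidates.foldl (fun d c => d.insert c (0 : Int)) PySem.Dict.empty)).items.filter
        (fun p => p.2 == 0)).map Prod.fst).head?
      = candidates.find?
          (fun c => !(PySem.Set.contains (PySem.Set.ofList (E.map (fun e => e.2))) c)) := by
  have hknd : locked.keys.Nodup := by rw [hkeys]; exact hnd
  rw [← List.foldl_flatMap]
  set L := locked.items.flatMap (fun p => p.2) with hLdef
  have hmemL : ∀ b, b ∈ L ↔ ∃ a, (a, b) ∈ E := by
    intro b
    constructor
    · intro hb
      rcases List.mem_flatMap.1 hb with ⟨p, hp, hbp⟩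
      have hg : locked.getD p.1 [] = p.2 :=
        PySem.Dict.getD_of_mem_items locked (by rw [Prod.mk.eta]; exact hp) hknd []
      exact ⟨p.1, (hinv p.1 b).1 (hg ▸ hbp)⟩
    · rintro ⟨a, ha⟩
      have hb : b ∈ locked.getD a [] := (hinv a b).2 ha
      rcases hga : locked.get? a with _ | sa
      · rw [PySem.Dict.getD_of_get?_eq_none locked ([] : PySem.Set String) hga] at hb; cases hb
      · rw [PySem.Dict.getD_of_get?_eq_some locked ([] : PySem.Set String) hga] at hb
        exact List.mem_flatMap.2 ⟨(a, sa), PySem.Dict.mem_items_of_get?_eq_some locked hga, hb⟩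
  have hLc : ∀ b ∈ L, b ∈ candidates := by
    intro b hb
    rcases (hmemL b).1 hb with ⟨a, ha⟩
    exact hE2 (a, b) ha
  have hitems0 : (candidates.foldl (fun d c => d.insert c (0 : Int)) PySem.Dict.empty).items
      = candidates.map (fun c => (c, (0 : Int))) := by
    have := PySem.Dict.items_foldl_insert_fresh (ν := Int) candidates (fun a => a) (fun _ => 0)
      PySem.Dict.empty (by intro a _; simp) (by simpa using hnd)
    simpa using this
  have hkeys0 : (candidates.foldl (fun d c => d.insert c (0 : Int)) PySem.Dict.empty).keys
      = candidates := by
    simp [PySem.Dict.keys, hitems0, Function.comp_def]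
  have hkeysInc : ((L.foldl (fun d b => d.modify b 0 (· + (1 : Int)))
      (candidates.foldl (fun d c => d.insert c (0 : Int)) PySem.Dict.empty)).keys) = candidates := by
    rw [PySem.Dict.keys_foldl_modify L 0 (fun _ _ => (· + (1 : Int))), hkeys0,
      PySem.Set.update_eq_append_filter]
    have hfil : List.filter (fun y => !(PySem.Set.contains candidates y)) (PySem.Set.ofList L)
        = [] := by
      rw [List.filter_eq_nil_iff]
      intro a ha hcon
      have haL : a ∈ L := (PySem.Set.mem_ofList _ _).1 ha
      simp at hcon
      exact hcon (hLc a haL)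
    rw [hfil, List.append_nil]
  have hgetD : ∀ k, (L.foldl (fun d b => d.modify b 0 (· + 1))
      (candidates.foldl (fun d c => d.insert c (0 : Int)) PySem.Dict.empty)).getD k 0
      = (L.count k : Int) := by
    intro k
    rw [PySem.Dict.getD_foldl_modify_add_one, pv_getD_zero candidates _ k (by simp), zero_add]
  have hndInc : ((L.foldl (fun d b => d.modify b 0 (· + (1 : Int)))
      (candidates.foldl (fun d c => d.insert c (0 : Int)) PySem.Dict.empty)).keys).Nodup := by
    rw [hkeysInc]; exact hnd
  have hItems : (L.foldl (fun d b => d.modify b 0 (· + 1))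
      (candidates.foldl (fun d c => d.insert c (0 : Int)) PySem.Dict.empty)).items
      = candidates.map (fun k => (k, (L.count k : Int))) := by
    rw [PySem.Dict.items_eq_map_keys _ hndInc 0, hkeysInc]
    exact List.map_congr_left (fun k _ => by rw [hgetD k])
  rw [hItems, pv_head_filter_map]
  have hpred : (fun k => ((L.count k : Int) == 0))
      = (fun c => !(PySem.Set.contains (PySem.Set.ofList (E.map (fun e => e.2))) c)) := by
    funext k
    by_cases hk : k ∈ L
    · have hc : L.count k ≠ 0 := Nat.pos_iff_ne_zero.mp (List.count_pos_iff.2 hk)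
      have h1 : ((L.count k : Int) == 0) = false := by
        simp [hc]
      have h2 : PySem.Set.contains (PySem.Set.ofList (E.map (fun e => e.2))) k = true := by
        rw [PySem.Set.contains_iff, PySem.Set.mem_ofList]
        rcases (hmemL k).1 hk with ⟨a, ha⟩
        exact List.mem_map.2 ⟨(a, k), ha, rfl⟩
      rw [h1, h2]; rfl
    · have h1 : ((L.count k : Int) == 0) = true := by
        simp [List.count_eq_zero.2 hk]
      have h2 : PySem.Set.contains (PySem.Set.ofList (E.map (fun e => e.2))) k = false := by
        rw [← Bool.not_eq_true, PySem.Set.contains_iff, PySem.Set.mem_ofList]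
        intro hm
        rcases List.mem_map.1 hm with ⟨e, he, hek⟩
        have heE : (e.1, k) ∈ E := by
          rw [← hek]
          rw [Prod.mk.eta]
          exact he
        exact hk ((hmemL k).2 ⟨e.1, heE⟩)
      rw [h1, h2]; rfl
  rw [hpred]

theorem pv_pairs_endpoints (candidates : List String) (pw : PySem.Dict (String × String) Int) :
    ∀ t ∈ pvA_pairs candidates pw, t.1 ∈ candidates ∧ t.2.1 ∈ candidates := by
  have inner : ∀ (bs : List String) (a : String) (acc : List (String × String × Int)),
      a ∈ candidates → (∀ b ∈ bs, b ∈ candidates) →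
      (∀ t ∈ acc, t.1 ∈ candidates ∧ t.2.1 ∈ candidates) →
      ∀ t ∈ bs.foldl (fun ps b =>
          if a = b then ps
          else
            if pw.getD (a, b) 0 > pw.getD (b, a) 0 then
              ps ++ [(a, b, pw.getD (a, b) 0 - pw.getD (b, a) 0)]
            else ps) acc,
        t.1 ∈ candidates ∧ t.2.1 ∈ candidates := by
    intro bs
    induction bs with
    | nil => intro a acc _ _ hacc t ht; exact hacc t ht
    | cons b bs ih =>
      intro a acc ha hbs hacc t ht
      rw [List.foldl_cons] at ht
      refine ih a _ ha (fun b' hb' => hbs b' (List.mem_cons_of_mem _ hb')) ?_ t ht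
      intro t' ht'
      split_ifs at ht' with h1 h2
      · exact hacc t' ht'
      · rcases List.mem_append.1 ht' with h | h
        · exact hacc t' h
        · rcases List.mem_singleton.1 h with rfl
          exact ⟨ha, hbs b List.mem_cons_self⟩
      · exact hacc t' ht'
  have outer : ∀ (as : List String) (acc : List (String × String × Int)),
      (∀ a ∈ as, a ∈ candidates) →
      (∀ t ∈ acc, t.1 ∈ candidates ∧ t.2.1 ∈ candidates) →
      ∀ t ∈ as.foldl (fun ps a => candidates.foldl (fun ps b =>
          if a = b then ps
          else
            if pw.getD (a, b) 0 > pw.getD (b, a) 0 then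
              ps ++ [(a, b, pw.getD (a, b) 0 - pw.getD (b, a) 0)]
            else ps) ps) acc,
        t.1 ∈ candidates ∧ t.2.1 ∈ candidates := by
    intro as
    induction as with
    | nil => intro acc _ hacc t ht; exact hacc t ht
    | cons a as ih =>
      intro acc has hacc t ht
      rw [List.foldl_cons] at ht
      refine ih _ (fun a' ha' => has a' (List.mem_cons_of_mem _ ha')) ?_ t ht
      exact inner candidates a acc (has a List.mem_cons_self) (fun b hb => hb) hacc
  intro t ht
  unfold pvA_pairs at ht
  exact outer candidates [] (fun a ha => ha) (by intro t' ht'; cases ht') t ht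

theorem pv_short_nodup (l : List String) (h : l.length < 2) : l.Nodup := by
  match l with
  | [] => exact List.nodup_nil
  | [a] => simp
  | a :: b :: t => simp at h

theorem pv_getD_locked0 (cs : List String) :
    ∀ (d : PySem.Dict String (PySem.Set String)) (x : String), d.getD x [] = [] →
      (cs.foldl (fun d c => d.insert c PySem.Set.empty) d).getD x [] = [] := by
  induction cs with
  | nil => intro d x h; simpa using h
  | cons c cs ih =>
    intro d x h
    rw [List.foldl_cons]
    apply ih
    rw [PySem.Dict.getD_insert]
    split_ifs
    · rfl
    · exact h

theorem pv_getD_reach0 (cs : List String) :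
    ∀ (d : PySem.Dict String (PySem.Set String)) (x : String),
      (cs.foldl (fun d c => d.insert c [c]) d).getD x []
        = if x ∈ cs then [x] else d.getD x [] := by
  induction cs with
  | nil => intro d x; simp
  | cons c cs ih =>
    intro d x
    rw [List.foldl_cons, ih, PySem.Dict.getD_insert]
    by_cases hx : x ∈ cs
    · simp [hx]
    · by_cases hxc : x = c
      · subst hxc; simp [hx]
      · simp [hx, hxc]

theorem pv_keys_locked0 (candidates : List String) (hnd : candidates.Nodup) :
    (candidates.foldl (fun d c => d.insert c (PySem.Set.empty : PySem.Set String))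
        PySem.Dict.empty).keys = candidates := by
  have h := PySem.Dict.items_foldl_insert_fresh (ν := PySem.Set String) candidates (fun a => a)
    (fun _ => PySem.Set.empty) PySem.Dict.empty (by intro a _; simp) (by simpa using hnd)
  simp at h
  simp only [PySem.Dict.keys, PySem.Set.empty]
  rw [h]
  simp [Function.comp_def, PySem.Dict.empty]

theorem pv_core (candidates : List String) (sp : List (String × String × Int))
    (hnd : candidates.Nodup)
    (hsp : ∀ t ∈ sp, t.1 ∈ candidates ∧ t.2.1 ∈ candidates) :
    ((((pvA_lock sp (candidates.foldl (fun d c => d.insert c PySem.Set.empty)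
          PySem.Dict.empty)).items.foldl
        (fun d p => p.2.foldl (fun d b => d.modify b 0 (· + 1)) d)
        (candidates.foldl (fun d c => d.insert c (0 : Int)) PySem.Dict.empty)).items.filter
        (fun p => p.2 == 0)).map Prod.fst).head?
      = candidates.find? (fun c =>
          !(PySem.Set.contains
            (PySem.Set.ofList ((pvB_lock candidates sp).2.map (fun e => e.2))) c)) := by
  have hinv0 : pvInv candidates
      (candidates.foldl (fun d c => d.insert c PySem.Set.empty) PySem.Dict.empty)
      (candidates.foldl (fun d c => d.insert c [c]) PySem.Dict.empty) [] := by
    refine ⟨pv_keys_locked0 candidates hnd, ?_, ?_, ?_⟩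
    · intro x y
      rw [pv_getD_locked0 candidates PySem.Dict.empty x (by simp)]
      simp
    · intro c hc x
      rw [pv_getD_reach0 candidates PySem.Dict.empty c, if_pos hc]
      unfold pvReach
      rw [Relation.reflTransGen_iff_eq (by intro b hb; cases hb)]
      simp [eq_comm]
    · intro e he; cases he
  have h := pv_lock_fold candidates sp
    (candidates.foldl (fun d c => d.insert c PySem.Set.empty) PySem.Dict.empty)
    (candidates.foldl (fun d c => d.insert c [c]) PySem.Dict.empty) [] hsp hinv0
  obtain ⟨hk, he, _, hE2⟩ := h
  unfold pvA_lock pvB_lock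
  exact pv_final_eq candidates _ _ hnd hk he hE2

-- ===== VERDICT (by name: the statement is the Claim_ definition above) =====
theorem ranked_pairs_winner_spec : Claim_equal_ranked_pairs_winner := by
  intro ballots _ hpre
  unfold Spec_ranked_pairs_winner
  cases ballots with
  | nil => rfl
  | cons first rest =>
    have hnd : first.Nodup := by
      by_cases h2 : 2 ≤ first.length
      · exact (hpre first List.mem_cons_self h2).1
      · exact pv_short_nodup first (by omega)
    have hsp : ∀ t ∈ PySem.List.sorted
        (pvA_pairs first (pvA_tally (first :: rest) (pvA_initPairwise first)))
        (fun t => -t.2.2) false,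
        t.1 ∈ first ∧ t.2.1 ∈ first := fun t ht =>
      pv_pairs_endpoints first _ t ((PySem.List.sorted_perm _ _ _).mem_iff.1 ht)
    exact pv_core first _ hnd hsp
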